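-- pv_equiv track=rewrite | github.com/miliar/Code_Jam_Webscraper | Solutions_python/Problem_201/2727.py | calculate_left_distance
-- ===== SOURCE A (Python) =====
-- def calculate_left_distance(arr):
--     length = len(arr)
--     result = [None] * length
--     for i in range(length):
--         if arr[i]:
--             result[i] = -1
--         else:
--             result[i] = result[i-1] + 1 # guarded, so it's safe
--     return result
-- ===== SOURCE B (Python) =====
-- def calculate_left_distance(arr):
--     last = None
--     result = []
--     for i, x in enumerate(arr):
--         if x:
--             last = i
--             result.append(-1)
--         else:
--             result.append(i - last - 1)
--     return result
-- ===== Notes on version B (the rewrite author's own statement) =====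
-- stated objective: alternative
-- what changed: Replaces A's preallocated result array and running recurrence result[i-1]+1 with a single append-building pass that tracks the index of the most recent truthy element and computes each distance directly as i - last - 1.
import Mathlib
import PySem

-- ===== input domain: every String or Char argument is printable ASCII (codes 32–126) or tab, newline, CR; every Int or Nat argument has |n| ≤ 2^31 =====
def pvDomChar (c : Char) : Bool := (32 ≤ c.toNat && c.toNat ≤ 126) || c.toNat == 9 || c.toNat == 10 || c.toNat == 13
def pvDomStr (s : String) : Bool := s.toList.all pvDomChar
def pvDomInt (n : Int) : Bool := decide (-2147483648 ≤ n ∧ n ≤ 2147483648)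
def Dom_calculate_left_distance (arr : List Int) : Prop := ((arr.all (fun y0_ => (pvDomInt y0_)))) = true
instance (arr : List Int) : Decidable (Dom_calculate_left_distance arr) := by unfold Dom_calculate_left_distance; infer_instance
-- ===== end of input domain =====

-- B replaces A's prev+1 recurrence on a preallocated array with an append-building pass
-- tracking the last truthy index and the direct formula i - last - 1 (alternative decomposition).

-- ===== PORT A =====
def calculate_left_distance (arr : List Int) : List Int :=
  let length := PySem.List.len arr
  let result : List (Option Int) := List.replicate length.toNat none
  let result := (PySem.List.pyRange 0 length 1).foldl
    (fun r i =>
      if PySem.List.pyGetD arr i 0 ≠ 0 then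
        PySem.List.pySetD r i (some (-1))
      else
        -- result[i-1] + 1: None + 1 raises in Python (excluded by Pre_); here the entry stays none
        PySem.List.pySetD r i ((PySem.List.pyGet? r (i - 1)).join.map (· + 1)))
    result
  result.map (fun v => v.getD 0)

-- ===== PORT B =====
def calculate_left_distance_alt (arr : List Int) : List Int :=
  ((PySem.List.enumerate arr 0).foldl
    (fun (st : Option Int × List Int) p =>
      if p.2 ≠ 0 then (some p.1, st.2 ++ [(-1 : Int)])
      else
        -- i - last - 1: last = None raises in Python (excluded by Pre_); getD is a placeholder there
        (st.1, st.2 ++ [p.1 - st.1.getD p.1 - 1]))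
    (none, [])).2

-- ===== PRECONDITION & SPEC =====
-- Pre_ excludes exactly the inputs where Python A raises TypeError (None + 1):
-- a nonempty list whose first element is falsy (zero).
def Pre_calculate_left_distance (arr : List Int) : Prop := arr = [] ∨ arr.getD 0 0 ≠ 0
instance (arr : List Int) : Decidable (Pre_calculate_left_distance arr) := by
  unfold Pre_calculate_left_distance; infer_instance
def pvWitness_calculate_left_distance : List Int := [1, 0, 0, 2, 0]
def Spec_calculate_left_distance (arr : List Int) (out : List Int) : Prop := out = calculate_left_distance_alt arr
instance (arr : List Int) (out : List Int) : Decidable (Spec_calculate_left_distance arr out) := by unfold Spec_calculate_left_distance; infer_instance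

-- ===== CLAIM (what is proved, stated in full; the proofs are below) =====
def Claim_equal_calculate_left_distance : Prop := ∀ (arr : List Int), Dom_calculate_left_distance arr → Pre_calculate_left_distance arr → Spec_calculate_left_distance arr (calculate_left_distance arr)

-- ===== LEMMAS AND PROOFS =====


-- the intended value at index k (meaningful when arr[0] ≠ 0)
def dval (arr : List Int) : Nat → Int
  | 0 => -1
  | k + 1 => if arr.getD (k + 1) 0 ≠ 0 then -1 else dval arr k + 1

-- index of the last truthy element among indices < k (meaningful for 1 ≤ k when arr[0] ≠ 0)
def lastIdx (arr : List Int) : Nat → Int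
  | 0 => 0
  | k + 1 => if arr.getD k 0 ≠ 0 then (k : Int) else lastIdx arr k

-- A's array after processing indices < k
def Rstate (arr : List Int) (k : Nat) : List (Option Int) :=
  (List.range arr.length).map (fun j => if j < k then some (dval arr j) else none)


-- dval at a truthy index is -1
theorem dval_pos (arr : List Int) (k : Nat) (h : arr.getD k 0 ≠ 0) : dval arr k = -1 := by
  cases k with
  | zero => simp [dval]
  | succ m => simp only [dval]; rw [if_pos h]

-- setting index k of A's state to the next dval advances Rstate
theorem Rstate_set (arr : List Int) (k : Nat) (hk : k < arr.length) :
    (Rstate arr k).set k (some (dval arr k)) = Rstate arr (k + 1) := by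
  apply List.ext_getElem
  · simp [Rstate]
  · intro j hj hj2
    simp only [Rstate, List.length_map, List.length_range] at hj2
    rw [List.getElem_set]
    simp only [Rstate, List.getElem_map, List.getElem_range]
    by_cases hjk : k = j
    · subst hjk; simp
    · simp only [if_neg hjk]
      have : j < k ↔ j < k + 1 := by omega
      simp [this]

theorem Afold (arr : List Int) (h0 : arr.getD 0 0 ≠ 0) :
    ∀ k, k ≤ arr.length →
      (PySem.List.pyRange 0 (k : Int) 1).foldl
        (fun r i =>
          if PySem.List.pyGetD arr i 0 ≠ 0 then
            PySem.List.pySetD r i (some (-1))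
          else
            PySem.List.pySetD r i ((PySem.List.pyGet? r (i - 1)).join.map (· + 1)))
        (List.replicate arr.length none) = Rstate arr k := by
  intro k
  induction k with
  | zero =>
    intro _
    rw [PySem.List.pyRange_one_eq_nil (by norm_num)]
    simp [Rstate]
  | succ k ih =>
    intro hk1
    have hk : k < arr.length := by omega
    have hsplit : PySem.List.pyRange 0 ((k:Nat) + 1 : Int) 1
        = PySem.List.pyRange 0 (k : Int) 1 ++ [(k : Int)] := by
      exact PySem.List.pyRange_one_succ_right (by positivity)
    have hcast : (((k + 1 : Nat)) : Int) = ((k : Nat) : Int) + 1 := by push_cast; ring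
    rw [hcast, hsplit, List.foldl_append, ih (by omega)]
    simp only [List.foldl_cons, List.foldl_nil]
    have hgetD : PySem.List.pyGetD arr ((k : Nat) : Int) 0 = arr.getD k 0 := by
      simp
    by_cases h : arr.getD k 0 ≠ 0
    · rw [if_pos (by rw [hgetD]; exact h)]
      rw [PySem.List.pySetD_natCast]
      rw [← dval_pos arr k h]
      exact Rstate_set arr k hk
    · push_neg at h
      rw [if_neg (by rw [hgetD]; simpa using h)]
      have hkpos : k ≠ 0 := by
        intro hzero; rw [hzero] at h; exact h0 h
      have hidx : ((k : Nat) : Int) - 1 = (((k - 1 : Nat)) : Int) := by omega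
      have hget : PySem.List.pyGet? (Rstate arr k) (((k - 1 : Nat)) : Int)
          = some (some (dval arr (k - 1))) := by
        rw [PySem.List.pyGet?_natCast]
        have hlt : k - 1 < arr.length := by omega
        simp only [Rstate, List.getElem?_map]
        rw [List.getElem?_range hlt]
        simp only [Option.map_some]
        have : k - 1 < k := by omega
        simp [this]
      rw [hidx, hget]
      simp only [Option.join_some, Option.map_some]
      have hdv : dval arr (k - 1) + 1 = dval arr k := by
        have hk' : k = (k - 1) + 1 := by omega
        rw [hk'] at h ⊢
        simp only [dval]
        rw [if_neg (not_not_intro h)]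
        norm_num
      rw [hdv, PySem.List.pySetD_natCast]
      exact Rstate_set arr k hk

theorem Bfold (arr : List Int) (h0 : arr.getD 0 0 ≠ 0) :
    ∀ k, 1 ≤ k → k ≤ arr.length →
      ((PySem.List.pyRange 0 (k : Int) 1).map (fun j => (j, PySem.List.pyGetD arr j 0))).foldl
        (fun (st : Option Int × List Int) p =>
          if p.2 ≠ 0 then (some p.1, st.2 ++ [(-1 : Int)])
          else (st.1, st.2 ++ [p.1 - st.1.getD p.1 - 1]))
        (none, [])
        = (some (lastIdx arr k), (List.range k).map (dval arr))
      ∧ ((k : Int) - 1) - lastIdx arr k - 1 = dval arr (k - 1) := by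
  intro k
  induction k with
  | zero => intro h1; omega
  | succ k ih =>
    intro _ hk1
    by_cases hk0 : k = 0
    · subst hk0
      have h1 : ((1 : Nat) : Int) = (0 : Int) + 1 := by norm_num
      rw [h1, PySem.List.pyRange_one_singleton]
      simp only [List.map_cons, List.map_nil, List.foldl_cons, List.foldl_nil]
      rw [if_pos (by simpa [PySem.List.pyGetD_zero] using h0)]
      have hl1 : lastIdx arr 1 = 0 := by
        simp only [lastIdx]; rw [if_pos h0]; rfl
      constructor
      · rw [hl1]; simp [dval]
      · rw [hl1]; simp [dval]
    · have hk : k < arr.length := by omega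
      have hge1 : 1 ≤ k := by omega
      obtain ⟨ihst, ihrel⟩ := ih hge1 (by omega)
      have hsplit : PySem.List.pyRange 0 ((k:Nat) + 1 : Int) 1
          = PySem.List.pyRange 0 (k : Int) 1 ++ [(k : Int)] := by
        exact PySem.List.pyRange_one_succ_right (by positivity)
      have hcast : (((k + 1 : Nat)) : Int) = ((k : Nat) : Int) + 1 := by push_cast; ring
      rw [hcast, hsplit, List.map_append, List.foldl_append, ihst]
      simp only [List.map_cons, List.map_nil, List.foldl_cons, List.foldl_nil]
      have hgetD : PySem.List.pyGetD arr ((k : Nat) : Int) 0 = arr.getD k 0 := by simp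
      have hdvk1 : dval arr (k + 1 - 1) = dval arr k := by norm_num
      by_cases h : arr.getD k 0 ≠ 0
      · rw [if_pos (by rw [hgetD]; exact h)]
        have hlast : lastIdx arr (k + 1) = (k : Int) := by
          simp only [lastIdx]; rw [if_pos h]
        have hdv : dval arr k = -1 := dval_pos arr k h
        refine ⟨?_, ?_⟩
        · rw [hlast, List.range_succ, List.map_append]
          simp [hdv]
        · rw [hdvk1, hlast, hdv]; push_cast; ring
      · push_neg at h
        rw [if_neg (by rw [hgetD]; simpa using h)]
        have hlast : lastIdx arr (k + 1) = lastIdx arr k := by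
          simp only [lastIdx]; rw [if_neg (not_not_intro h)]
        have hdv : dval arr k = dval arr (k - 1) + 1 := by
          have hk' : k = (k - 1) + 1 := by omega
          rw [hk'] at h ⊢
          simp only [dval]
          rw [if_neg (not_not_intro h)]
          norm_num
        have hval : (k : Int) - lastIdx arr k - 1 = dval arr k := by
          rw [hdv, ← ihrel]; ring
        refine ⟨?_, ?_⟩
        · rw [hlast, List.range_succ, List.map_append]
          simp only [List.map_cons, List.map_nil, Option.getD_some]
          rw [hval]
        · rw [hdvk1, hlast, ← hval]; push_cast; ring

-- ===== VERDICT (by name: the statement is the Claim_ definition above) =====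
theorem calculate_left_distance_spec : Claim_equal_calculate_left_distance := by
  unfold Claim_equal_calculate_left_distance
  intro arr _ hpre
  unfold Spec_calculate_left_distance
  rcases hpre with hnil | h0
  · subst hnil; decide
  · have hne : arr.length ≠ 0 := by
      intro hlen
      rw [List.length_eq_zero_iff] at hlen
      subst hlen; exact h0 rfl
    unfold calculate_left_distance calculate_left_distance_alt
    simp only [PySem.List.len_eq, Int.toNat_natCast]
    rw [Afold arr h0 arr.length le_rfl]
    rw [PySem.List.enumerate_eq_map_pyRange (d := 0), PySem.List.len_eq]
    rw [(Bfold arr h0 arr.length (by omega) le_rfl).1]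
    apply List.ext_getElem
    · simp [Rstate]
    · intro j hj hj2
      simp only [Rstate, List.getElem_map, List.getElem_range]
      simp only [List.length_map, List.length_range] at hj2
      simp [hj2]
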